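-- pv_equiv track=rewrite | github.com/cheinks/symmetrical-sniffle | Truth Tables.py | tabulate_left
-- ===== SOURCE A (Python) =====
-- def equivalence(a, b): # 00
--     return a == b
--
-- def implication(a, b): # 01
--     if a: return b
--     else: return not a
--
-- def conjunction(a, b): # 10
--     return a and b
--
-- def disjunction(a, b): # 11
--     return a or b
--
-- def eval_simple(a, b, c):
--     if c == 0:
--         return equivalence(a, b)
--     elif c == 1:
--         return implication(a, b)
--     elif c == 2:
--         return conjunction(a, b)
--     else:
--         return disjunction(a, b)
--
-- def input_left(P, Q, R, c1, c2):
--     return eval_simple(eval_simple(P, Q, c1), R, c2)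
--
-- def tabulate_left(c1, c2, notp, notq, notr):
--     p_list = [True, False]
--     if notp:
--         p_list = [False, True]
--     q_list = [True, False]
--     if notq:
--         q_list = [False, True]
--     r_list = [True, False]
--     if notr:
--         r_list = [False, True]
--
--     result = ""
--     # Loop through the three inputs
--     for P in p_list:
--         for Q in q_list:
--             for R in r_list:
--                 # Evaluate the current iteration
--                 out = input_left(P, Q, R, c1, c2)
--                 # Append a 0 if true
--                 if out:
--                     result += "0"
--                 # Or a 1 if false
--                 else:
--                     result += "1"
--
--     return int(result, 2)
-- ===== SOURCE B (Python) =====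
-- def _mask_op(c, a, b):
--     # apply the connective to whole 8-row truth-table columns (bytes)
--     if c == 0:
--         return (a ^ b) ^ 255   # equivalence: bit set where bits agree
--     if c == 1:
--         return (a ^ 255) | b   # implication: not-a or b
--     if c == 2:
--         return a & b           # conjunction
--     return a | b               # disjunction
--
-- def tabulate_left(c1, c2, notp, notq, notr):
--     # one byte per variable: bit 7 is the first table row (P,Q,R all "true" side)
--     P = 0b00001111 if notp else 0b11110000
--     Q = 0b00110011 if notq else 0b11001100
--     R = 0b01010101 if notr else 0b10101010
--     # true rows produce '0' digits, so the answer is the complement of the column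
--     return _mask_op(c2, _mask_op(c1, P, Q), R) ^ 255
-- ===== Notes on version B (the rewrite author's own statement) =====
-- stated objective: alternative
-- what changed: Replaces the row-by-row truth-table enumeration (three nested loops building a bitstring parsed with int(s,2)) with a loop-free bit-parallel evaluation: each variable's whole 8-row column is a single byte constant, the two connectives are applied once each as bitwise operations on bytes, and the result is the complement of the final byte.
import Mathlib
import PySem

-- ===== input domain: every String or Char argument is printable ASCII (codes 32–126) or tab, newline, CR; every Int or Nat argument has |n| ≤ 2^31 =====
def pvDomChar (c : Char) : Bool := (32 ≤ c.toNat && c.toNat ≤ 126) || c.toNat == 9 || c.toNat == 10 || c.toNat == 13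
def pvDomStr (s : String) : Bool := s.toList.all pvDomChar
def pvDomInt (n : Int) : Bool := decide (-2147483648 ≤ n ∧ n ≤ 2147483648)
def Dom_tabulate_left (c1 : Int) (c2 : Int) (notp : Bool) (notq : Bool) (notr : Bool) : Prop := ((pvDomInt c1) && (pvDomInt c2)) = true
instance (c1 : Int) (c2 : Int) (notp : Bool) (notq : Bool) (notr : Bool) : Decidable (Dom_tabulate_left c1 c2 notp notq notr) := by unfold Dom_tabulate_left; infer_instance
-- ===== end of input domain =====

-- B replaces A's row-by-row enumeration (nested loops + bitstring + int(s,2)) by a loop-free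
-- bit-parallel evaluation: one byte constant per variable column, bitwise connectives, complement.

-- ===== PORT A =====
def pyEquivalence (a b : Bool) : Bool := a == b

def pyImplication (a b : Bool) : Bool := if a then b else !a

def pyConjunction (a b : Bool) : Bool := a && b

def pyDisjunction (a b : Bool) : Bool := a || b

def pyEvalSimple (a b : Bool) (c : Int) : Bool :=
  if c = 0 then pyEquivalence a b
  else if c = 1 then pyImplication a b
  else if c = 2 then pyConjunction a b
  else pyDisjunction a b

def pyInputLeft (P Q R : Bool) (c1 c2 : Int) : Bool :=
  pyEvalSimple (pyEvalSimple P Q c1) R c2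

-- int(result, 2): exact for nonempty strings of '0'/'1' digits, which `result` always is here
def pyIntBase2 (s : String) : Int :=
  s.toList.foldl (fun acc c => acc * 2 + (if c = '1' then 1 else 0)) 0

def tabulate_left (c1 : Int) (c2 : Int) (notp : Bool) (notq : Bool) (notr : Bool) : Int :=
  let p_list : List Bool := if notp then [false, true] else [true, false]
  let q_list : List Bool := if notq then [false, true] else [true, false]
  let r_list : List Bool := if notr then [false, true] else [true, false]
  let result : String :=
    p_list.foldl (fun res P =>
      q_list.foldl (fun res Q =>
        r_list.foldl (fun res R =>
          res ++ (if pyInputLeft P Q R c1 c2 then "0" else "1")) res) res) ""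
  pyIntBase2 result

-- ===== PORT B =====
-- Int.xor/lor/land are exact two's-complement bitwise ops, matching Python's ^ | & on int
def maskOp (c : Int) (a b : Int) : Int :=
  if c = 0 then Int.xor (Int.xor a b) 255
  else if c = 1 then Int.lor (Int.xor a 255) b
  else if c = 2 then Int.land a b
  else Int.lor a b

def tabulate_left_alt (c1 : Int) (c2 : Int) (notp : Bool) (notq : Bool) (notr : Bool) : Int :=
  let P : Int := if notp then 15 else 240
  let Q : Int := if notq then 51 else 204
  let R : Int := if notr then 85 else 170
  Int.xor (maskOp c2 (maskOp c1 P Q) R) 255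

-- ===== PRECONDITION & SPEC =====
def Spec_tabulate_left (c1 : Int) (c2 : Int) (notp : Bool) (notq : Bool) (notr : Bool) (out : Int) : Prop := out = tabulate_left_alt c1 c2 notp notq notr
instance (c1 : Int) (c2 : Int) (notp : Bool) (notq : Bool) (notr : Bool) (out : Int) : Decidable (Spec_tabulate_left c1 c2 notp notq notr out) := by unfold Spec_tabulate_left; infer_instance

-- ===== CLAIM (what is proved, stated in full; the proofs are below) =====
def Claim_equal_tabulate_left : Prop := ∀ (c1 : Int) (c2 : Int) (notp : Bool) (notq : Bool) (notr : Bool), Dom_tabulate_left c1 c2 notp notq notr → Spec_tabulate_left c1 c2 notp notq notr (tabulate_left c1 c2 notp notq notr)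

-- ===== LEMMAS AND PROOFS =====
set_option maxHeartbeats 1000000

-- canonical representative of the operator code (proof helper only)
def pvCanon (c : Int) : Int := if c = 0 then 0 else if c = 1 then 1 else if c = 2 then 2 else 3

theorem pvCanon_cases (c : Int) : pvCanon c = 0 ∨ pvCanon c = 1 ∨ pvCanon c = 2 ∨ pvCanon c = 3 := by
  unfold pvCanon; split_ifs <;> simp

theorem eval_canon (a b : Bool) (c : Int) : pyEvalSimple a b (pvCanon c) = pyEvalSimple a b c := by
  unfold pvCanon pyEvalSimple; split_ifs <;> simp_all

theorem mask_canon (a b : Int) (c : Int) : maskOp (pvCanon c) a b = maskOp c a b := by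
  unfold pvCanon maskOp; split_ifs <;> simp_all

theorem tabA_canon (c1 c2 : Int) (p q r : Bool) :
    tabulate_left (pvCanon c1) (pvCanon c2) p q r = tabulate_left c1 c2 p q r := by
  unfold tabulate_left pyInputLeft
  simp only [eval_canon]

theorem tabB_canon (c1 c2 : Int) (p q r : Bool) :
    tabulate_left_alt (pvCanon c1) (pvCanon c2) p q r = tabulate_left_alt c1 c2 p q r := by
  unfold tabulate_left_alt
  simp only [mask_canon]

theorem tab_core (d1 d2 : Int)
    (hd1 : d1 = 0 ∨ d1 = 1 ∨ d1 = 2 ∨ d1 = 3) (hd2 : d2 = 0 ∨ d2 = 1 ∨ d2 = 2 ∨ d2 = 3)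
    (p q r : Bool) : tabulate_left d1 d2 p q r = tabulate_left_alt d1 d2 p q r := by
  rcases hd1 with rfl | rfl | rfl | rfl <;> rcases hd2 with rfl | rfl | rfl | rfl <;>
    cases p <;> cases q <;> cases r <;> decide

theorem tabulate_left_spec' (c1 c2 : Int) (notp notq notr : Bool) :
    tabulate_left c1 c2 notp notq notr = tabulate_left_alt c1 c2 notp notq notr := by
  rw [← tabA_canon, ← tabB_canon]
  exact tab_core _ _ (pvCanon_cases c1) (pvCanon_cases c2) notp notq notr

-- ===== VERDICT (by name: the statement is the Claim_ definition above) =====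
theorem tabulate_left_spec : Claim_equal_tabulate_left := by
  intro c1 c2 notp notq notr _
  exact tabulate_left_spec' c1 c2 notp notq notr
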